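-- pv_equiv track=rewrite | github.com/danielmoderntheory/school-scheduler | backend/solver.py | count_same_day_open
-- ===== SOURCE A (Python) =====
-- DAYS = ['Mon', 'Tues', 'Wed', 'Thurs', 'Fri']
--
-- BLOCKS = [1, 2, 3, 4, 5]
--
-- def count_same_day_open(teacher_schedules: dict, teacher: str) -> int:
--     """Count days with multiple OPEN blocks for a teacher (spread_open metric).
--
--     Returns the number of "extra" OPEN blocks per day beyond the first.
--     E.g., if a teacher has 3 OPEN blocks on Monday, that's 2 issues (3-1=2).
--
--     Both OPEN and Study Hall count as "open" for this calculation.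
--     """
--     count = 0
--     schedule = teacher_schedules.get(teacher, {})
--
--     for day in DAYS:
--         open_count = 0
--         for block in BLOCKS:
--             cell = schedule.get(day, {}).get(block)
--             if cell and len(cell) > 1 and cell[1] in ('OPEN', 'Study Hall'):
--                 open_count += 1
--         # Penalize having more than 1 OPEN block per day
--         if open_count > 1:
--             count += open_count - 1
--
--     return count
-- ===== SOURCE B (Python) =====
-- DAYS = ['Mon', 'Tues', 'Wed', 'Thurs', 'Fri']
--
-- BLOCKS = [1, 2, 3, 4, 5]
--
-- def count_same_day_open(teacher_schedules: dict, teacher: str) -> int: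
--     """Walk the teacher's own schedule items (instead of probing every DAY x BLOCK
--     by lookup) and add each day's extras beyond its first open block."""
--     extras = 0
--     for day, row in teacher_schedules.get(teacher, {}).items():
--         if day not in DAYS:
--             continue
--         opens = len([cell for block, cell in row.items()
--                      if block in BLOCKS and cell and len(cell) > 1
--                      and cell[1] in ('OPEN', 'Study Hall')])
--         if opens:
--             extras += opens - 1
--     return extras
-- ===== Notes on version B (the rewrite author's own statement) =====
-- stated objective: alternative
-- what changed: Instead of A's probing of every DAYS x BLOCKS cell by dictionary lookup with a per-day open_count loop, B iterates once over the teacher's own schedule items, membership-filtering the days and blocks it actually finds and adding each day's extras.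
import Mathlib
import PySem

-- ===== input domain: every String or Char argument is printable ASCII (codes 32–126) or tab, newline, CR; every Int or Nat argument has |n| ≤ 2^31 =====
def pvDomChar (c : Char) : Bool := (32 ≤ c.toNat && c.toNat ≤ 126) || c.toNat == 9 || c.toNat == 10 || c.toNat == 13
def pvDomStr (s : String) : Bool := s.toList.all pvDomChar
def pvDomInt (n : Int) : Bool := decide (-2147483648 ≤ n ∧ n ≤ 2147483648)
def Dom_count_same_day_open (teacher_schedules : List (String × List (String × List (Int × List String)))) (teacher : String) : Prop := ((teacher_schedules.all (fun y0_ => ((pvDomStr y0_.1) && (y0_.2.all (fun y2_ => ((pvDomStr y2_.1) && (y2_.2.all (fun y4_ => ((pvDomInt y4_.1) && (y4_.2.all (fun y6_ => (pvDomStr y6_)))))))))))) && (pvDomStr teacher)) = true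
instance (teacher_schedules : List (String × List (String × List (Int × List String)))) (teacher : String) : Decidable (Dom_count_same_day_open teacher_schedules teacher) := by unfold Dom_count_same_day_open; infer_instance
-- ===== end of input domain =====

-- B walks the teacher's own schedule items once (membership-filtering every day/block it finds)
-- instead of A's probing of all DAYS×BLOCKS cells by dictionary lookup (alternative decomposition).

-- module constants DAYS / BLOCKS (shared by both Python files)
def pvDays : List String := ["Mon", "Tues", "Wed", "Thurs", "Fri"]
def pvBlocks : List Int := [1, 2, 3, 4, 5]

-- ===== PORT A =====
-- A's cell test: `cell and len(cell) > 1 and cell[1] in ('OPEN', 'Study Hall')` on a looked-up Option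
def pvOpenCellA (cell : Option (List String)) : Bool :=
  match cell with
  | none => false
  | some c => !c.isEmpty && decide (1 < c.length) &&
      (match PySem.List.pyGet? c 1 with
       | some s => s == "OPEN" || s == "Study Hall"
       | none => false)

def count_same_day_open (teacher_schedules : List (String × List (String × List (Int × List String)))) (teacher : String) : Int :=
  let schedule := PySem.Dict.getD (PySem.Dict.mk teacher_schedules) teacher []
  pvDays.foldl (fun count day =>
    let open_count := pvBlocks.foldl (fun oc block =>
      if pvOpenCellA (PySem.Dict.get? (PySem.Dict.mk (PySem.Dict.getD (PySem.Dict.mk schedule) day [])) block) then oc + 1 else oc) (0 : Int)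
    if open_count > 1 then count + (open_count - 1) else count) 0

-- ===== PORT B =====
-- B's cell test on the cell value itself (no Option: B only ever sees cells present in the row)
def pvIsOpen (cell : List String) : Bool :=
  !cell.isEmpty && decide (1 < cell.length) &&
    (match PySem.List.pyGet? cell 1 with
     | some s => s == "OPEN" || s == "Study Hall"
     | none => false)

def count_same_day_open_alt (teacher_schedules : List (String × List (String × List (Int × List String)))) (teacher : String) : Int :=
  ((PySem.Dict.ofList (PySem.Dict.getD (PySem.Dict.mk teacher_schedules) teacher [])).items).foldl
    (fun extras dr =>
      if decide (dr.1 ∈ pvDays) then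
        let opens := (((PySem.Dict.ofList dr.2).items).filter
          (fun bc => decide (bc.1 ∈ pvBlocks) && pvIsOpen bc.2)).length
        if opens ≠ 0 then extras + (opens : Int) - 1 else extras
      else extras) 0

-- ===== PRECONDITION & SPEC =====
-- Pre_ excludes association lists whose day-level or block-level key lists contain duplicates:
-- such lists never arise from an actual Python dict, and on them A's first-match lookup versus
-- B's dict-construction (last value wins) is an accidental first-vs-last-match corner.
def Pre_count_same_day_open (teacher_schedules : List (String × List (String × List (Int × List String)))) (teacher : String) : Prop :=
  ∀ p ∈ teacher_schedules, (p.2.map Prod.fst).Nodup ∧ ∀ q ∈ p.2, (q.2.map Prod.fst).Nodup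
instance (teacher_schedules : List (String × List (String × List (Int × List String)))) (teacher : String) : Decidable (Pre_count_same_day_open teacher_schedules teacher) := by unfold Pre_count_same_day_open; infer_instance
def pvWitness_count_same_day_open : (List (String × List (String × List (Int × List String)))) × String :=
  ([("T", [("Mon", [(1, ["x", "OPEN"]), (2, ["y", "Study Hall"]), (3, ["z", "Math"])])])], "T")

def Spec_count_same_day_open (teacher_schedules : List (String × List (String × List (Int × List String)))) (teacher : String) (out : Int) : Prop := out = count_same_day_open_alt teacher_schedules teacher
instance (teacher_schedules : List (String × List (String × List (Int × List String)))) (teacher : String) (out : Int) : Decidable (Spec_count_same_day_open teacher_schedules teacher out) := by unfold Spec_count_same_day_open; infer_instance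

-- ===== CLAIM (what is proved, stated in full; the proofs are below) =====
def Claim_equal_count_same_day_open : Prop := ∀ (teacher_schedules : List (String × List (String × List (Int × List String)))) (teacher : String), Dom_count_same_day_open teacher_schedules teacher → Pre_count_same_day_open teacher_schedules teacher → Spec_count_same_day_open teacher_schedules teacher (count_same_day_open teacher_schedules teacher)

-- ===== LEMMAS AND PROOFS =====

-- a sum over nodup keys of an ite at one point k, where h vanishes at k
theorem pv_sum_ite_point {κ : Type} [BEq κ] [LawfulBEq κ] [DecidableEq κ] (keys : List κ) (k : κ) (a : Int) (h : κ → Int)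
    (hnd : keys.Nodup) (h0 : h k = 0) :
    (keys.map (fun d => if d = k then a else h d)).sum
      = (if k ∈ keys then a else 0) + (keys.map h).sum := by
  induction keys with
  | nil => simp
  | cons d t ih =>
    rcases List.nodup_cons.mp hnd with ⟨hd, hnd'⟩
    by_cases hdk : d = k
    · subst hdk
      have : t.map (fun d' => if d' = d then a else h d') = t.map h :=
        List.map_congr_left (fun x hx => by
          have : x ≠ d := fun e => hd (e ▸ hx)
          simp [this])
      simp [this, h0]
    · have hkd : ¬ k = d := fun e => hdk (Eq.symm e)
      simp only [List.map_cons, List.sum_cons, if_neg hdk, ih hnd', List.mem_cons]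
      by_cases hk : k ∈ t <;> simp [hk, hkd] <;> ring

-- exchange: probing every key of `keys` in the dict `mk l` = scanning l's items filtered by `keys`
theorem pv_exchange {κ ν : Type} [BEq κ] [LawfulBEq κ] [DecidableEq κ]
    (keys : List κ) (l : List (κ × ν)) (g : Option ν → Int)
    (hnd : (l.map Prod.fst).Nodup) (hkeys : keys.Nodup) (h0 : g none = 0) :
    (keys.map (fun k => g ((PySem.Dict.mk l).get? k))).sum
      = (l.map (fun p => if p.1 ∈ keys then g (some p.2) else 0)).sum := by
  induction l with
  | nil => simp [PySem.Dict.get?, h0]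
  | cons p t ih =>
    rcases List.nodup_cons.mp hnd with ⟨hp, hnd'⟩
    have hget : ∀ k, (PySem.Dict.mk (p :: t)).get? k
        = if k = p.1 then some p.2 else (PySem.Dict.mk t).get? k := by
      intro k
      rw [show (PySem.Dict.mk (p :: t)) = ({ items := (p.1, p.2) :: t } : PySem.Dict κ ν) by rfl,
        PySem.Dict.get?_mk_cons]
      by_cases hk : k = p.1
      · subst hk; simp
      · have hne : (p.1 == k) = false := beq_eq_false_iff_ne.mpr (fun e => hk (Eq.symm e))
        simp [hk, hne]
    have hmiss : (PySem.Dict.mk t).get? p.1 = none := by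
      rcases h : (PySem.Dict.mk t).get? p.1 with _ | v
      · rfl
      · exact absurd (List.mem_map_of_mem (f := Prod.fst)
          (PySem.Dict.mem_items_of_get?_eq_some _ h)) hp
    calc (keys.map (fun k => g ((PySem.Dict.mk (p :: t)).get? k))).sum
        = (keys.map (fun k => if k = p.1 then g (some p.2)
            else g ((PySem.Dict.mk t).get? k))).sum := by
          congr 1; exact List.map_congr_left (fun k _ => by rw [hget k]; split <;> rfl)
      _ = (if p.1 ∈ keys then g (some p.2) else 0)
            + (keys.map (fun k => g ((PySem.Dict.mk t).get? k))).sum :=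
          pv_sum_ite_point keys p.1 (g (some p.2)) (fun k => g ((PySem.Dict.mk t).get? k))
            hkeys (by simp only []; rw [hmiss]; exact h0)
      _ = ((p :: t).map (fun q => if q.1 ∈ keys then g (some q.2) else 0)).sum := by
          rw [ih hnd']; simp

-- the items of ofList on a duplicate-free association list are the list itself
theorem pv_ofList_items {κ ν : Type} [BEq κ] [LawfulBEq κ] (l : List (κ × ν))
    (hnd : (l.map Prod.fst).Nodup) : (PySem.Dict.ofList l).items = l := by
  have h := PySem.Dict.items_foldl_insert_fresh l Prod.fst Prod.snd PySem.Dict.empty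
    (fun a _ => PySem.Dict.contains_empty a.1) hnd
  simpa [PySem.Dict.ofList, PySem.Dict.update] using h

-- a fold that conditionally adds is the sum of the per-item contributions
theorem pv_foldl_eq_sum_map {β : Type} (l : List β) (g : β → Int) (f : Int → β → Int) (a : Int)
    (hf : ∀ c x, f c x = c + g x) : l.foldl f a = a + (l.map g).sum := by
  induction l generalizing a with
  | nil => simp
  | cons x t ih => simp [List.foldl_cons, hf, ih] ; ring

-- A's per-day extra as a function of the open count
theorem pv_eA_eq_eB (n : Nat) :
    (if ((n : Int)) > 1 then ((n : Int)) - 1 else 0) = (if n ≠ 0 then (n : Int) - 1 else 0) := by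
  by_cases h : n = 0
  · simp [h]
  · by_cases h1 : n = 1 <;> simp [h, h1] <;> omega

-- inner equivalence on one row: A's counting loop over BLOCKS = length of B's filtered items
theorem pv_inner (row : List (Int × List String)) (hnd : (row.map Prod.fst).Nodup) :
    pvBlocks.foldl (fun oc block =>
        if pvOpenCellA ((PySem.Dict.mk row).get? block) then oc + 1 else oc) (0 : Int)
      = ((row.filter (fun bc => decide (bc.1 ∈ pvBlocks) && pvIsOpen bc.2)).length : Int) := by
  rw [PySem.List.foldl_count_if, zero_add, ← List.countP_eq_length_filter,
    ← PySem.List.sum_map_ite_one_zero, ← PySem.List.sum_map_ite_one_zero,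
    pv_exchange pvBlocks row (fun o => if pvOpenCellA o then 1 else 0) hnd (by decide)
      (by simp [pvOpenCellA])]
  congr 1
  refine List.map_congr_left (fun p _ => ?_)
  by_cases hb : p.1 ∈ pvBlocks <;> by_cases ho : pvIsOpen p.2 = true <;>
    simp_all [pvOpenCellA, pvIsOpen]

-- ===== VERDICT (by name: the statement is the Claim_ definition above) =====
theorem count_same_day_open_spec : Claim_equal_count_same_day_open := by
  intro ts teacher _ hpre
  unfold Spec_count_same_day_open count_same_day_open count_same_day_open_alt
  obtain ⟨sched, hsched⟩ : ∃ s, s = PySem.Dict.getD (PySem.Dict.mk ts) teacher [] := ⟨_, rfl⟩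
  rw [← hsched]
  -- the looked-up schedule satisfies the Nodup facts of Pre_
  have hschedmem : sched = [] ∨ (teacher, sched) ∈ ts := by
    rw [hsched, PySem.Dict.getD_eq_get?_getD]
    rcases h : (PySem.Dict.mk ts).get? teacher with _ | v
    · left; rfl
    · right; exact PySem.Dict.mem_items_of_get?_eq_some _ h
  have hnd : (sched.map Prod.fst).Nodup ∧ ∀ q ∈ sched, (q.2.map Prod.fst).Nodup := by
    rcases hschedmem with h | h
    · rw [h]; exact ⟨List.nodup_nil, by simp⟩
    · exact ⟨(hpre _ h).1, (hpre _ h).2⟩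
  -- both sides as sums over their respective lists
  rw [pv_foldl_eq_sum_map pvDays (fun day =>
      if (pvBlocks.foldl (fun oc block =>
        if pvOpenCellA ((PySem.Dict.mk (PySem.Dict.getD (PySem.Dict.mk sched) day [])).get? block)
          then oc + 1 else oc) (0 : Int)) > 1
      then (pvBlocks.foldl (fun oc block =>
        if pvOpenCellA ((PySem.Dict.mk (PySem.Dict.getD (PySem.Dict.mk sched) day [])).get? block)
          then oc + 1 else oc) (0 : Int)) - 1 else 0) _ 0
      (fun c x => by simp only []; split <;> simp),
    pv_foldl_eq_sum_map ((PySem.Dict.ofList sched).items) (fun dr =>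
      if decide (dr.1 ∈ pvDays) then
        (if (((PySem.Dict.ofList dr.2).items.filter
            (fun bc => decide (bc.1 ∈ pvBlocks) && pvIsOpen bc.2)).length) ≠ 0
         then ((((PySem.Dict.ofList dr.2).items.filter
            (fun bc => decide (bc.1 ∈ pvBlocks) && pvIsOpen bc.2)).length : Int)) - 1 else 0)
      else 0) _ 0
      (fun c x => by
        simp only []
        by_cases h1 : decide (x.1 ∈ pvDays) = true <;> simp only [h1, if_true]
        · split <;> omega
        · simp),
    pv_ofList_items sched hnd.1, zero_add, zero_add]
  -- exchange at the day level: probing DAYS in sched = scanning sched's items filtered by DAYS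
  simp only [PySem.Dict.getD_eq_get?_getD]
  refine Eq.trans (pv_exchange pvDays sched (fun o =>
      if (pvBlocks.foldl (fun oc block =>
        if pvOpenCellA ((PySem.Dict.mk (o.getD [])).get? block) then oc + 1 else oc) (0 : Int)) > 1
      then (pvBlocks.foldl (fun oc block =>
        if pvOpenCellA ((PySem.Dict.mk (o.getD [])).get? block) then oc + 1 else oc) (0 : Int)) - 1
      else 0) hnd.1 (by decide) (by decide)) ?_
  congr 1
  refine List.map_congr_left (fun q hq => ?_)
  rw [pv_ofList_items q.2 (hnd.2 q hq)]
  by_cases hmem : q.1 ∈ pvDays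
  · simp only [hmem, decide_true, if_true, Option.getD_some]
    refine Eq.trans (congrArg (fun z : Int => if z > 1 then z - 1 else 0)
      (pv_inner q.2 (hnd.2 q hq))) ?_
    exact pv_eA_eq_eB ((q.2.filter (fun bc => decide (bc.1 ∈ pvBlocks) && pvIsOpen bc.2)).length)
  · simp [hmem]
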